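-- pv_equiv track=rewrite | github.com/RafayAK/CodingPrep | DailyCodingProblem/165_Google_Find_Number_of_Small_Elements_to_Right_of_Array.py | count_smaller_on_right
-- ===== SOURCE A (Python) =====
-- def count_smaller_on_right(arr:list):
--     new_arr = []
--
--     for i in range(len(arr)):
--         count = 0
--         curr_number = arr[i]
--
--         for j in range(i+1, len(arr)):
--             if arr[j] - curr_number < 0:
--                 count += 1
--         new_arr.append(count)
--
--     return new_arr
-- ===== SOURCE B (Python) =====
-- def count_smaller_on_right(arr: list):
--     # Scan right-to-left, maintaining a sorted list of the elements already seen
--     # (the suffix); the insertion position of each element is its answer.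
--     res = []
--     seen = []  # sorted ascending
--     for x in reversed(arr):
--         lo = 0
--         while lo < len(seen) and seen[lo] < x:
--             lo += 1
--         res.append(lo)
--         seen.insert(lo, x)
--     res.reverse()
--     return res
-- ===== Notes on version B (the rewrite author's own statement) =====
-- stated objective: alternative
-- what changed: Replaces the nested index loops (for each i, rescan the whole suffix) by a single right-to-left pass that maintains a sorted list of the elements already seen; each element's answer is its insertion position in that list.
import Mathlib
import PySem

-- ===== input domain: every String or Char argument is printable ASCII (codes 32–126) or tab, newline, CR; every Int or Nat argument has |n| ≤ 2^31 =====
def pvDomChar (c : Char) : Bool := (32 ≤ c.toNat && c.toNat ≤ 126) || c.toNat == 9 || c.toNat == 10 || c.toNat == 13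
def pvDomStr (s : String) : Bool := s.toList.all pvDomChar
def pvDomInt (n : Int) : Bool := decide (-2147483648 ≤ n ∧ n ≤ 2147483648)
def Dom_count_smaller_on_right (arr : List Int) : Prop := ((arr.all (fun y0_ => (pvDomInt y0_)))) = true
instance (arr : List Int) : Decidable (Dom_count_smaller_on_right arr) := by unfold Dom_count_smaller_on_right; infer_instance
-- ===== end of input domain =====

-- B replaces A's nested index loops by one right-to-left pass over a maintained
-- sorted list (each element's answer = its insertion position); alternative algorithm, same results.

-- ===== PORT A =====
def count_smaller_on_right (arr : List Int) : List Int :=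
  (PySem.List.pyRange 0 arr.length 1).foldl (fun new_arr i =>
    let curr_number := PySem.List.pyGetD arr i 0
    let count := (PySem.List.pyRange (i + 1) arr.length 1).foldl
      (fun count j => if PySem.List.pyGetD arr j 0 - curr_number < 0 then count + 1 else count)
      (0 : Int)
    new_arr ++ [count]) []

-- ===== PORT B =====
-- the while loop 'lo = 0; while lo < len(seen) and seen[lo] < x: lo += 1'
def pvScan : List Int → Int → Nat
  | [], _ => 0
  | y :: ys, x => if y < x then pvScan ys x + 1 else 0

def count_smaller_on_right_alt (arr : List Int) : List Int :=
  (arr.reverse.foldl (fun (p : List Int × List Int) x =>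
      let lo := pvScan p.2 x
      (p.1 ++ [(lo : Int)], PySem.List.insert p.2 (lo : Int) x)) ([], [])).1.reverse

-- ===== PRECONDITION & SPEC =====
def Spec_count_smaller_on_right (arr : List Int) (out : List Int) : Prop := out = count_smaller_on_right_alt arr
instance (arr : List Int) (out : List Int) : Decidable (Spec_count_smaller_on_right arr out) := by unfold Spec_count_smaller_on_right; infer_instance

-- ===== CLAIM (what is proved, stated in full; the proofs are below) =====
def Claim_equal_count_smaller_on_right : Prop := ∀ (arr : List Int), Dom_count_smaller_on_right arr → Spec_count_smaller_on_right arr (count_smaller_on_right arr)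

-- ===== LEMMAS AND PROOFS =====

-- reference spec: for each head, count the strictly smaller elements in its tail
def pvSpecFn : List Int → List Int
  | [] => []
  | x :: xs => ((xs.countP (fun y => decide (y < x)) : Nat) : Int) :: pvSpecFn xs

-- sorted insertion, the combined effect of B's scan + list.insert on a sorted list
def pvIns : List Int → Int → List Int
  | [], x => [x]
  | y :: ys, x => if y < x then y :: pvIns ys x else x :: y :: ys

-- B's pass with the sorted 'seen' list abstracted to the bare multiset m of processed elements
def pvG : List Int → List Int → List Int
  | _, [] => []
  | m, x :: xs => ((m.countP (fun y => decide (y < x)) : Nat) : Int) :: pvG (x :: m) xs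

theorem pvScan_le (s : List Int) (x : Int) : pvScan s x ≤ s.length := by
  induction s with
  | nil => simp [pvScan]
  | cons y ys ih => simp only [pvScan, List.length_cons]; split <;> omega

theorem insert_scan_eq (s : List Int) (x : Int) :
    PySem.List.insert s ((pvScan s x : Nat) : Int) x = pvIns s x := by
  rw [PySem.List.insert_natCast s (pvScan s x) x (pvScan_le s x)]
  induction s with
  | nil => rfl
  | cons y ys ih =>
    simp only [pvScan, pvIns]
    split
    · simpa using ih
    · simp

theorem pvIns_perm (s : List Int) (x : Int) : (pvIns s x).Perm (x :: s) := by
  induction s with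
  | nil => simp [pvIns]
  | cons y ys ih =>
    simp only [pvIns]
    split
    · exact (ih.cons y).trans (List.Perm.swap x y ys)
    · exact List.Perm.refl _

theorem pvIns_sorted (s : List Int) (x : Int) (hs : s.Pairwise (· ≤ ·)) :
    (pvIns s x).Pairwise (· ≤ ·) := by
  induction s with
  | nil => simp [pvIns]
  | cons y ys ih =>
    rcases List.pairwise_cons.mp hs with ⟨hy, hys⟩
    simp only [pvIns]
    split
    · rename_i hlt
      refine List.pairwise_cons.mpr ⟨?_, ih hys⟩
      intro z hz
      rcases List.mem_cons.mp ((pvIns_perm ys x).mem_iff.mp hz) with h | h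
      · subst h; exact le_of_lt hlt
      · exact hy z h
    · rename_i hnlt
      rw [not_lt] at hnlt
      refine List.pairwise_cons.mpr ⟨?_, hs⟩
      intro z hz
      rcases List.mem_cons.mp hz with h | h
      · subst h; exact hnlt
      · exact le_trans hnlt (hy z h)

-- on a sorted list the linear scan counts exactly the elements < x
theorem pvScan_countP (s : List Int) (x : Int) (hs : s.Pairwise (· ≤ ·)) :
    pvScan s x = s.countP (fun y => decide (y < x)) := by
  induction s with
  | nil => rfl
  | cons y ys ih =>
    rcases List.pairwise_cons.mp hs with ⟨hy, hys⟩
    simp only [pvScan, List.countP_cons]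
    split
    · rename_i hlt; rw [ih hys]; simp [hlt]
    · rename_i hnlt
      rw [not_lt] at hnlt
      have : ys.countP (fun y => decide (y < x)) = 0 := by
        rw [List.countP_eq_zero]
        intro z hz
        simp only [decide_eq_true_eq]
        exact not_lt.mpr (le_trans hnlt (hy z hz))
      simp [this, not_lt.mpr hnlt]

theorem loop_inv (rest : List Int) : ∀ (res seen m : List Int),
    seen.Pairwise (· ≤ ·) → seen.Perm m →
    (rest.foldl (fun (p : List Int × List Int) x =>
      let lo := pvScan p.2 x
      (p.1 ++ [(lo : Int)], PySem.List.insert p.2 (lo : Int) x)) (res, seen)).1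
    = res ++ pvG m rest := by
  induction rest with
  | nil => intro res seen m _ _; simp [pvG]
  | cons x xs ih =>
    intro res seen m hs hp
    simp only [List.foldl_cons]
    rw [insert_scan_eq]
    have hc : pvScan seen x = m.countP (fun y => decide (y < x)) := by
      rw [pvScan_countP seen x hs]; exact hp.countP_eq _
    rw [ih (res ++ [((pvScan seen x : Nat) : Int)]) (pvIns seen x) (x :: m)
        (pvIns_sorted seen x hs) ((pvIns_perm seen x).trans (hp.cons x))]
    simp [pvG, hc]

theorem pvG_append (l : List Int) : ∀ (m : List Int) (x : Int),
    pvG m (l ++ [x]) = pvG m l ++ [(((l.reverse ++ m).countP (fun y => decide (y < x)) : Nat) : Int)] := by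
  induction l with
  | nil => intro m x; simp [pvG]
  | cons a l ih =>
    intro m x
    simp [pvG, ih (a :: m) x]

theorem B_eq_spec (arr : List Int) : count_smaller_on_right_alt arr = pvSpecFn arr := by
  unfold count_smaller_on_right_alt
  rw [loop_inv arr.reverse [] [] [] (by simp) (List.Perm.refl _), List.nil_append]
  induction arr with
  | nil => simp [pvG, pvSpecFn]
  | cons x xs ih =>
    rw [List.reverse_cons, pvG_append, List.reverse_append]
    simp only [List.reverse_reverse, List.append_nil, List.reverse_cons] at *
    simp [pvSpecFn, ih]

theorem foldl_if_count (p : Int → Prop) [DecidablePred p] (l : List Int) (a : Int) :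
    l.foldl (fun c y => if p y then c + 1 else c) a = a + ((l.countP (fun y => decide (p y)) : Nat) : Int) := by
  induction l generalizing a with
  | nil => simp
  | cons y ys ih =>
    simp only [List.foldl_cons, List.countP_cons, ih]
    split <;> rename_i h <;> simp [h] <;> ring

theorem inner_count (arr : List Int) (k : Nat) :
    (PySem.List.pyRange ((k : Int) + 1) arr.length 1).foldl
      (fun count j => if PySem.List.pyGetD arr j 0 - PySem.List.pyGetD arr (k : Int) 0 < 0 then count + 1 else count)
      (0 : Int)
    = (((arr.drop (k + 1)).countP (fun y => decide (y < arr.getD k 0)) : Nat) : Int) := by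
  have h0 : (0 : Int) ≤ (k : Int) + 1 := by positivity
  rw [PySem.List.foldl_pyRange_pyGetD' (a := (k : Int) + 1) (xs := arr) (d := 0)
      (f := fun c y => if y - PySem.List.pyGetD arr (k : Int) 0 < 0 then c + 1 else c) (init := (0:Int)) h0]
  rw [foldl_if_count (fun y => y - PySem.List.pyGetD arr (k:Int) 0 < 0)]
  have ht : ((k : Int) + 1).toNat = k + 1 := by omega
  rw [ht, zero_add]
  congr 1
  apply List.countP_congr
  intro y _
  rw [PySem.List.pyGetD_natCast]
  simp [sub_neg]

theorem range_map_eq_spec (arr : List Int) :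
    (List.range arr.length).map
      (fun k => (((arr.drop (k+1)).countP (fun y => decide (y < arr.getD k 0)) : Nat) : Int))
    = pvSpecFn arr := by
  induction arr with
  | nil => simp [pvSpecFn]
  | cons x xs ih =>
    rw [List.length_cons, List.range_succ_eq_map, List.map_cons, List.map_map]
    simp only [Function.comp_def, Nat.succ_eq_add_one, List.drop_succ_cons, List.getD_cons_succ,
      List.getD_cons_zero, List.drop_zero] at *
    rw [ih]
    rfl

theorem A_eq_spec (arr : List Int) : count_smaller_on_right arr = pvSpecFn arr := by
  unfold count_smaller_on_right
  rw [PySem.List.foldl_append_singleton_eq_map, List.nil_append, PySem.List.pyRange_zero_nat,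
    List.map_map]
  rw [← range_map_eq_spec]
  apply List.map_congr_left
  intro k _
  simp only [Function.comp_def]
  rw [inner_count arr k]

-- ===== VERDICT (by name: the statement is the Claim_ definition above) =====
theorem count_smaller_on_right_spec : Claim_equal_count_smaller_on_right := by
  intro arr _
  unfold Spec_count_smaller_on_right
  rw [A_eq_spec, B_eq_spec]
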